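-- pv_equiv track=rewrite | github.com/HanykyrJakub/PHP-PR-CE-PROJEKTY | Cracking the code.py | give_hint
-- ===== SOURCE A (Python) =====
-- def give_hint(code, guess):
--     """Poskytuje nápovědu: Počet čísel na správné pozici a počet správných čísel na špatné pozici."""
--     correct_position = 0
--     correct_number = 0
--     code_copy = code.copy()
--     guess_copy = guess.copy()
--
--     # Kontrola čísel na správné pozici
--     for i in range(len(code)):
--         if guess[i] == code[i]:
--             correct_position += 1
--             code_copy[i] = guess_copy[i] = None  # Označit jako zkontrolované
--
--     # Kontrola správných čísel na špatné pozici
--     for i in range(len(guess)):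
--         if guess_copy[i] is not None and guess_copy[i] in code_copy:
--             correct_number += 1
--             code_copy[code_copy.index(guess_copy[i])] = None  # Označit číslo jako použité
--
--     return correct_position, correct_number
-- ===== SOURCE B (Python) =====
-- def give_hint(code, guess):
--     """Sort-and-merge: exact matches by an indexed scan; total multiset
--     intersection by a two-pointer merge over sorted copies; misplaced =
--     intersection - exact."""
--     correct_position = 0
--     for i in range(len(code)):
--         if guess[i] == code[i]:
--             correct_position += 1
--     sc = sorted(code)
--     sg = sorted(guess)
--     inter = 0
--     i = 0
--     j = 0
--     while i < len(sc) and j < len(sg):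
--         if sc[i] == sg[j]:
--             inter += 1
--             i += 1
--             j += 1
--         elif sc[i] < sg[j]:
--             i += 1
--         else:
--             j += 1
--     return correct_position, inter - correct_position
-- ===== Notes on version B (the rewrite author's own statement) =====
-- stated objective: faster
-- what changed: Replaces A's mark-and-scan removal (None sentinels plus repeated 'in'/'.index' scans over code_copy) with sorting both lists and a two-pointer merge that counts the multiset intersection, returning (exact, intersection - exact).
import Mathlib
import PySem

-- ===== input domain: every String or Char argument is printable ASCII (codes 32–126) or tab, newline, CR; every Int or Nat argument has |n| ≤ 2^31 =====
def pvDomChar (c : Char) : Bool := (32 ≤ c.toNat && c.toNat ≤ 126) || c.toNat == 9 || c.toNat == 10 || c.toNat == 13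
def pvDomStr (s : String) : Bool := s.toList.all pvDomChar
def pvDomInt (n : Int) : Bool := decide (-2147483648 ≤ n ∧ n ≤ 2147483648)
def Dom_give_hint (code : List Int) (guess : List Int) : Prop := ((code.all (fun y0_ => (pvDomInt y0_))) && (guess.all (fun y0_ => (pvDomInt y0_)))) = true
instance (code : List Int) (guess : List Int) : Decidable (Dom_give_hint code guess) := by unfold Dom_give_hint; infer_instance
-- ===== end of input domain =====

-- B replaces A's mark-and-scan removal with sorting both lists and a two-pointer merge counting the
-- multiset intersection (misplaced = intersection - exact); different algorithm, measured faster.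

-- ===== PORT A =====
-- A's mark-and-scan: copies with None sentinels, membership + .index scans over code_copy.
-- first-loop body of A, named for the proofs
def pvStepA1 (code : List Int) (guess : List Int)
    (s : Int × List (Option Int) × List (Option Int)) (i : Int) :
    Int × List (Option Int) × List (Option Int) :=
  if PySem.List.pyGetD guess i 0 = PySem.List.pyGetD code i 0 then
    (s.1 + 1, PySem.List.pySetD s.2.1 i none, PySem.List.pySetD s.2.2 i none)
  else s

-- second-loop body of A, as a function of the element guess_copy[i]
def pvStepA2 (s : Int × List (Option Int)) (g : Option Int) : Int × List (Option Int) :=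
  match g with
  | none => s
  | some g =>
    if some g ∈ s.2 then
      match PySem.List.index? s.2 (some g) with
      | some k => (s.1 + 1, s.2.set k none)
      | none => s
    else s

def give_hint (code : List Int) (guess : List Int) : List Int :=
  let s1 := (PySem.List.pyRange 0 (code.length : Int) 1).foldl (pvStepA1 code guess)
    (0, code.map some, guess.map some)
  let s2 := (PySem.List.pyRange 0 (guess.length : Int) 1).foldl
    (fun s i => pvStepA2 s (PySem.List.pyGetD s1.2.2 i none)) (0, s1.2.1)
  [s1.1, s2.1]

-- ===== PORT B =====
-- B: indexed scan for exact matches, then sorted copies and a two-pointer merge counting equal elements.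
-- the while loop of B: two-pointer merge over the remaining suffixes of the two sorted lists
def pvMergeCount : List Int → List Int → Int
  | [], _ => 0
  | _ :: _, [] => 0
  | a :: s, b :: t =>
    if a = b then 1 + pvMergeCount s t
    else if a < b then pvMergeCount s (b :: t)
    else pvMergeCount (a :: s) t
  termination_by s t => s.length + t.length

def give_hint_alt (code : List Int) (guess : List Int) : List Int :=
  let cp := (PySem.List.pyRange 0 (code.length : Int) 1).foldl
    (fun a i => if PySem.List.pyGetD guess i 0 = PySem.List.pyGetD code i 0 then a + 1 else a) (0 : Int)
  let inter := pvMergeCount (PySem.List.sorted code (fun x => x) false)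
    (PySem.List.sorted guess (fun x => x) false)
  [cp, inter - cp]

-- ===== PRECONDITION & SPEC =====
-- Pre_ excludes guesses shorter than the code: there Python A raises IndexError (guess[i] in the first loop), and B raises too.
def Pre_give_hint (code : List Int) (guess : List Int) : Prop := code.length ≤ guess.length
instance (code : List Int) (guess : List Int) : Decidable (Pre_give_hint code guess) := by unfold Pre_give_hint; infer_instance
def pvWitness_give_hint : List Int × List Int := ([1, 2, 3, 4], [4, 2, 1, 1])

def Spec_give_hint (code : List Int) (guess : List Int) (out : List Int) : Prop := out = give_hint_alt code guess
instance (code : List Int) (guess : List Int) (out : List Int) : Decidable (Spec_give_hint code guess out) := by unfold Spec_give_hint; infer_instance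

-- ===== CLAIM (what is proved, stated in full; the proofs are below) =====
def Claim_equal_give_hint : Prop := ∀ (code : List Int) (guess : List Int), Dom_give_hint code guess → Pre_give_hint code guess → Spec_give_hint code guess (give_hint code guess)

-- ===== LEMMAS AND PROOFS =====

-- a stable name for `xs.getD i 0` so `simp` does not normalize it away mid-proof
def pvget (xs : List Int) (i : Nat) : Int := xs.getD i 0

lemma getD_eq_pvget (xs : List Int) (i : Nat) : xs.getD i 0 = pvget xs i := rfl

lemma pvget_lt {xs : List Int} {i : Nat} (h : i < xs.length) : pvget xs i = xs[i] := by
  simp [pvget, List.getD_eq_getElem?_getD, List.getElem?_eq_getElem h]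

-- closed forms for the state of A's first loop after k iterations
def pvCC (code guess : List Int) (k : Nat) : List (Option Int) :=
  (List.range code.length).map
    (fun i => if i < k ∧ pvget guess i = pvget code i then none else some (pvget code i))

def pvGC (code guess : List Int) (k : Nat) : List (Option Int) :=
  (List.range guess.length).map
    (fun i => if i < k ∧ pvget guess i = pvget code i then none else some (pvget guess i))

def pvEx (code guess : List Int) (k : Nat) : Int :=
  ((List.range k).countP (fun i => pvget guess i == pvget code i) : Int)

lemma pvCC_zero (code guess : List Int) : pvCC code guess 0 = code.map some := by
  unfold pvCC
  apply List.ext_getElem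
  · simp
  · intro i h1 h2
    simp only [List.getElem_map, List.getElem_range]
    rw [if_neg (by omega), pvget_lt (show i < code.length by simpa using h1)]

lemma pvGC_zero (code guess : List Int) : pvGC code guess 0 = guess.map some := by
  unfold pvGC
  apply List.ext_getElem
  · simp
  · intro i h1 h2
    simp only [List.getElem_map, List.getElem_range]
    rw [if_neg (by omega), pvget_lt (show i < guess.length by simpa using h1)]

lemma pvEx_succ (code guess : List Int) (k : Nat) :
    pvEx code guess (k + 1)
      = pvEx code guess k + (if pvget guess k = pvget code k then 1 else 0) := by
  unfold pvEx
  rw [List.range_succ, List.countP_append]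
  by_cases hc : pvget guess k = pvget code k <;> simp [hc]

lemma pvCC_succ_eq (code guess : List Int) (k : Nat)
    (hc : pvget guess k = pvget code k) :
    pvCC code guess (k + 1) = (pvCC code guess k).set k none := by
  unfold pvCC
  apply List.ext_getElem
  · simp
  · intro i h1 h2
    simp only [List.getElem_map, List.getElem_range, List.getElem_set]
    by_cases hik : k = i
    · subst hik; rw [if_pos ⟨by omega, hc⟩, if_pos rfl]
    · rw [if_neg hik]
      refine if_congr ?_ rfl rfl
      constructor
      · rintro ⟨h1', h2'⟩; exact ⟨by omega, h2'⟩
      · rintro ⟨h1', h2'⟩; exact ⟨by omega, h2'⟩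

lemma pvCC_succ_ne (code guess : List Int) (k : Nat)
    (hc : ¬ pvget guess k = pvget code k) :
    pvCC code guess (k + 1) = pvCC code guess k := by
  unfold pvCC
  apply List.ext_getElem
  · simp
  · intro i h1 h2
    simp only [List.getElem_map, List.getElem_range]
    by_cases hik : i = k
    · subst hik; rw [if_neg (fun h => hc h.2), if_neg (fun h => hc h.2)]
    · refine if_congr ?_ rfl rfl
      constructor
      · rintro ⟨h1', h2'⟩; exact ⟨by omega, h2'⟩
      · rintro ⟨h1', h2'⟩; exact ⟨by omega, h2'⟩

lemma pvGC_succ_eq (code guess : List Int) (k : Nat)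
    (hc : pvget guess k = pvget code k) :
    pvGC code guess (k + 1) = (pvGC code guess k).set k none := by
  unfold pvGC
  apply List.ext_getElem
  · simp
  · intro i h1 h2
    simp only [List.getElem_map, List.getElem_range, List.getElem_set]
    by_cases hik : k = i
    · subst hik; rw [if_pos ⟨by omega, hc⟩, if_pos rfl]
    · rw [if_neg hik]
      refine if_congr ?_ rfl rfl
      constructor
      · rintro ⟨h1', h2'⟩; exact ⟨by omega, h2'⟩
      · rintro ⟨h1', h2'⟩; exact ⟨by omega, h2'⟩

lemma pvGC_succ_ne (code guess : List Int) (k : Nat)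
    (hc : ¬ pvget guess k = pvget code k) :
    pvGC code guess (k + 1) = pvGC code guess k := by
  unfold pvGC
  apply List.ext_getElem
  · simp
  · intro i h1 h2
    simp only [List.getElem_map, List.getElem_range]
    by_cases hik : i = k
    · subst hik; rw [if_neg (fun h => hc h.2), if_neg (fun h => hc h.2)]
    · refine if_congr ?_ rfl rfl
      constructor
      · rintro ⟨h1', h2'⟩; exact ⟨by omega, h2'⟩
      · rintro ⟨h1', h2'⟩; exact ⟨by omega, h2'⟩

lemma phase1A (code guess : List Int) :
    ∀ (k : Nat), k ≤ code.length →
    (PySem.List.pyRange 0 (k : Int) 1).foldl (pvStepA1 code guess) (0, code.map some, guess.map some)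
      = (pvEx code guess k, pvCC code guess k, pvGC code guess k) := by
  intro k
  induction k with
  | zero =>
    intro _
    rw [PySem.List.pyRange_one_eq_nil (by norm_num)]
    simp [pvEx, pvCC_zero, pvGC_zero]
  | succ k ih =>
    intro hk
    have hcast : ((k + 1 : Nat) : Int) = (k : Int) + 1 := by push_cast; ring
    rw [hcast, PySem.List.pyRange_one_succ_right (by positivity), List.foldl_append,
      ih (by omega)]
    simp only [List.foldl_cons, List.foldl_nil]
    unfold pvStepA1
    simp only [PySem.List.pyGetD_natCast, PySem.List.pySetD_natCast, getD_eq_pvget]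
    by_cases hc : pvget guess k = pvget code k
    · rw [if_pos hc, pvEx_succ, pvCC_succ_eq code guess k hc,
        pvGC_succ_eq code guess k hc, if_pos hc]
    · rw [if_neg hc, pvEx_succ, pvCC_succ_ne code guess k hc, pvGC_succ_ne code guess k hc,
        if_neg hc, add_zero]

-- B's first loop computes the same exact-match count
lemma phase1B (code guess : List Int) :
    ∀ (k : Nat),
    (PySem.List.pyRange 0 (k : Int) 1).foldl
      (fun a i => if PySem.List.pyGetD guess i 0 = PySem.List.pyGetD code i 0 then a + 1 else a) (0 : Int)
      = pvEx code guess k := by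
  intro k
  induction k with
  | zero =>
    rw [PySem.List.pyRange_one_eq_nil (by norm_num)]
    simp [pvEx]
  | succ k ih =>
    have hcast : ((k + 1 : Nat) : Int) = (k : Int) + 1 := by push_cast; ring
    rw [hcast, PySem.List.pyRange_one_succ_right (by positivity), List.foldl_append, ih]
    simp only [List.foldl_cons, List.foldl_nil, PySem.List.pyGetD_natCast, getD_eq_pvget]
    rw [pvEx_succ]
    by_cases hc : pvget guess k = pvget code k <;> simp [hc]

-- the multiset of non-None entries of an Option-list
def pvOms (xs : List (Option Int)) : Multiset Int := ↑(xs.filterMap id)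

lemma mem_pvOms (xs : List (Option Int)) (v : Int) : v ∈ pvOms xs ↔ some v ∈ xs := by
  simp [pvOms, List.mem_filterMap]

lemma pvOms_set_none (cc : List (Option Int)) (k : Nat) (v : Int)
    (hk : k < cc.length) (hg : cc[k] = some v) :
    pvOms (cc.set k none) = (pvOms cc).erase v := by
  unfold pvOms
  rw [List.set_eq_take_append_cons_drop, if_pos hk]
  conv_rhs => rw [show cc = cc.take k ++ cc[k] :: cc.drop (k+1) by
    rw [List.getElem_cons_drop, List.take_append_drop]]
  rw [hg]
  simp only [List.filterMap_append, List.filterMap_cons, id]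
  rw [← Multiset.coe_add, ← Multiset.coe_add, ← Multiset.cons_coe, Multiset.add_cons,
    Multiset.erase_cons_head]

-- A's second loop counts the multiset intersection of the unmatched guess and code entries
lemma phase2A : ∀ (gc : List (Option Int)) (a : Int) (cc : List (Option Int)),
    (gc.foldl pvStepA2 (a, cc)).1 = a + ((pvOms gc ∩ pvOms cc).card : Int) := by
  intro gc
  induction gc with
  | nil => intro a cc; simp [pvOms]
  | cons g gc ih =>
    intro a cc
    match g with
    | none =>
      simp only [List.foldl_cons, pvStepA2, ih]
      simp [pvOms]
    | some v =>
      simp only [List.foldl_cons, pvStepA2]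
      by_cases hmem : some v ∈ cc
      · obtain ⟨k, hk⟩ := Option.isSome_iff_exists.mp
          ((PySem.List.index?_isSome_iff _ _).mpr hmem)
        obtain ⟨hklt, hkg, -⟩ := PySem.List.getElem_of_index?_eq_some hk
        simp only [if_pos hmem, hk, ih]
        rw [pvOms_set_none cc k v hklt hkg]
        have hv : v ∈ pvOms cc := (mem_pvOms cc v).mpr hmem
        have : pvOms (some v :: gc) = v ::ₘ pvOms gc := by
          simp [pvOms]
        rw [this, Multiset.cons_inter_of_pos _ hv, Multiset.card_cons]
        push_cast; ring
      · simp only [if_neg hmem, ih]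
        have hv : v ∉ pvOms cc := fun h => hmem ((mem_pvOms cc v).mp h)
        have : pvOms (some v :: gc) = v ::ₘ pvOms gc := by simp [pvOms]
        rw [this, Multiset.cons_inter_of_neg _ hv]

-- B's merge counts the multiset intersection of two sorted lists
lemma mergeCount_eq : ∀ (sc sg : List Int), sc.Pairwise (· ≤ ·) → sg.Pairwise (· ≤ ·) →
    pvMergeCount sc sg = (((↑sc : Multiset Int) ∩ ↑sg).card : Int) := by
  intro sc sg
  induction sc, sg using pvMergeCount.induct with
  | case1 sg => intro _ _; simp [pvMergeCount]
  | case2 a s => intro _ _; simp [pvMergeCount]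
  | case3 s a t ih =>
    intro hsc hsg
    rw [pvMergeCount, if_pos rfl, ih (List.Pairwise.of_cons hsc) (List.Pairwise.of_cons hsg)]
    have hsplit : ((a :: s : List Int) : Multiset Int) ∩ ↑(a :: t) = a ::ₘ (↑s ∩ ↑t) := by
      rw [(Multiset.cons_coe a s).symm, (Multiset.cons_coe a t).symm,
        Multiset.cons_inter_of_pos _ (Multiset.mem_cons_self a ↑t), Multiset.erase_cons_head]
    rw [hsplit, Multiset.card_cons]
    push_cast; ring
  | case4 a s b t hab hlt ih =>
    intro hsc hsg
    rw [pvMergeCount, if_neg hab, if_pos hlt, ih (List.Pairwise.of_cons hsc) hsg]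
    have ha : a ∉ ((b :: t : List Int) : Multiset Int) := by
      rw [Multiset.mem_coe]
      intro hmem
      rcases List.mem_cons.mp hmem with h | h
      · exact hab h
      · exact absurd ((List.pairwise_cons.mp hsg).1 a h) (not_le.mpr hlt)
    have hsplit : ((a :: s : List Int) : Multiset Int) ∩ ↑(b :: t) = ↑s ∩ ↑(b :: t) := by
      rw [(Multiset.cons_coe a s).symm]
      exact Multiset.cons_inter_of_neg _ ha
    rw [hsplit]
  | case5 a s b t hab hlt ih =>
    intro hsc hsg
    rw [pvMergeCount, if_neg hab, if_neg hlt, ih hsc (List.Pairwise.of_cons hsg)]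
    have hba : b < a := by
      rcases lt_trichotomy a b with h | h | h
      · exact absurd h hlt
      · exact absurd h hab
      · exact h
    have hb : b ∉ ((a :: s : List Int) : Multiset Int) := by
      rw [Multiset.mem_coe]
      intro hmem
      rcases List.mem_cons.mp hmem with h | h
      · exact hab h.symm
      · exact absurd ((List.pairwise_cons.mp hsc).1 b h) (not_le.mpr hba)
    have hsplit : ((a :: s : List Int) : Multiset Int) ∩ ↑(b :: t) = ↑(a :: s) ∩ ↑t :=
      calc ((a :: s : List Int) : Multiset Int) ∩ ↑(b :: t)
          = (↑(b :: t) : Multiset Int) ∩ ↑(a :: s) := Multiset.inter_comm _ _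
        _ = (b ::ₘ ↑t) ∩ ↑(a :: s) := by rw [Multiset.cons_coe]
        _ = (↑t : Multiset Int) ∩ ↑(a :: s) := Multiset.cons_inter_of_neg _ hb
        _ = (↑(a :: s) : Multiset Int) ∩ ↑t := Multiset.inter_comm _ _
    rw [hsplit]

-- the multiset of values matched in place
def pvU (code guess : List Int) : List Int :=
  (List.range code.length).filterMap
    (fun i => if pvget guess i = pvget code i then some (pvget code i) else none)

lemma pvU_length (code guess : List Int) :
    ((pvU code guess).length : Int) = pvEx code guess code.length := by
  unfold pvU pvEx
  congr 1
  induction (List.range code.length) with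
  | nil => simp
  | cons i l ih =>
    simp only [List.filterMap_cons, List.countP_cons]
    by_cases hc : pvget guess i = pvget code i <;> simp [hc, ih]

-- splitting a mapped list by a predicate into two filterMaps, as multisets
lemma map_split (ls : List Nat) (f : Nat → Int) (p : Nat → Prop) [DecidablePred p] :
    (↑(ls.map f) : Multiset Int)
      = ↑(ls.filterMap (fun i => if p i then some (f i) else none))
        + ↑(ls.filterMap (fun i => if p i then none else some (f i))) := by
  induction ls with
  | nil => simp
  | cons i l ih =>
    simp only [List.map_cons, List.filterMap_cons]
    by_cases hp : p i
    · simp only [if_pos hp, ← Multiset.cons_coe, Multiset.cons_add, ih]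
    · simp only [if_neg hp, ← Multiset.cons_coe, Multiset.add_cons, ih]

lemma list_eq_map_range (xs : List Int) : xs = (List.range xs.length).map (pvget xs) := by
  apply List.ext_getElem
  · simp
  · intro i h1 h2
    simp only [List.getElem_map, List.getElem_range]
    exact (pvget_lt h1).symm

lemma split_code (code guess : List Int) :
    (↑code : Multiset Int) = ↑(pvU code guess) + pvOms (pvCC code guess code.length) := by
  conv_lhs => rw [list_eq_map_range code]
  rw [map_split (List.range code.length) (pvget code)
    (fun i => pvget guess i = pvget code i)]
  congr 1
  unfold pvOms pvCC
  rw [List.filterMap_map]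
  congr 1
  apply List.filterMap_congr
  intro i hi
  have hilt : i < code.length := by simpa using hi
  simp only [Function.comp, id]
  by_cases hc : pvget guess i = pvget code i
  · rw [if_pos hc, if_pos ⟨hilt, hc⟩]
  · rw [if_neg hc, if_neg (fun h => hc h.2)]

lemma split_guess (code guess : List Int) (h : code.length ≤ guess.length) :
    (↑guess : Multiset Int) = ↑(pvU code guess) + pvOms (pvGC code guess code.length) := by
  conv_lhs => rw [list_eq_map_range guess]
  rw [map_split (List.range guess.length) (pvget guess)
    (fun i => i < code.length ∧ pvget guess i = pvget code i)]
  congr 1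
  · -- the matched part over range guess.length equals pvU (over range code.length)
    rw [show guess.length = code.length + (guess.length - code.length) by omega,
      List.range_add, List.filterMap_append]
    have h2 : (List.filterMap
        (fun i => if i < code.length ∧ pvget guess i = pvget code i then some (pvget guess i) else none)
        ((List.range (guess.length - code.length)).map (fun x => code.length + x))) = [] := by
      rw [List.filterMap_map]
      apply List.filterMap_eq_nil_iff.mpr
      intro x _
      simp only [Function.comp]
      rw [if_neg (fun hc => by omega)]
    rw [h2, List.append_nil]
    unfold pvU
    congr 1
    apply List.filterMap_congr
    intro i hi
    have hilt : i < code.length := by simpa using hi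
    by_cases hc : pvget guess i = pvget code i
    · rw [if_pos ⟨hilt, hc⟩, if_pos hc, hc]
    · rw [if_neg (fun hh => hc hh.2), if_neg hc]
  · unfold pvOms pvGC
    rw [List.filterMap_map]
    congr 1

-- min distributes over a common part: (u + s) ∩ (u + t) = u + s ∩ t
lemma inter_add_split (u s t : Multiset Int) : (u + s) ∩ (u + t) = u + s ∩ t := by
  ext v
  simp only [Multiset.count_inter, Multiset.count_add]
  omega

lemma pvGC_length (code guess : List Int) :
    (pvGC code guess code.length).length = guess.length := by
  simp [pvGC]

-- ===== VERDICT (by name: the statement is the Claim_ definition above) =====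
theorem give_hint_spec : Claim_equal_give_hint := by
  intro code guess _hdom hpre
  unfold Spec_give_hint give_hint give_hint_alt
  rw [phase1A code guess code.length le_rfl]
  simp only
  -- A's second loop: fold over the elements of guess_copy
  have hlen : (guess.length : Int) = ((pvGC code guess code.length).length : Int) := by
    rw [pvGC_length]
  rw [hlen, PySem.List.foldl_pyRange_zero_pyGetD' (pvGC code guess code.length) none pvStepA2
    (0, pvCC code guess code.length), phase2A, phase1B code guess code.length]
  -- B's merge: card of the full multiset intersection
  rw [mergeCount_eq _ _
    (by simpa using PySem.List.sorted_pairwise code (fun x => x))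
    (by simpa using PySem.List.sorted_pairwise guess (fun x => x))]
  have hc : ((PySem.List.sorted code (fun x => x) false : List Int) : Multiset Int) = ↑code :=
    Multiset.coe_eq_coe.mpr (PySem.List.sorted_perm code (fun x => x) false)
  have hg : ((PySem.List.sorted guess (fun x => x) false : List Int) : Multiset Int) = ↑guess :=
    Multiset.coe_eq_coe.mpr (PySem.List.sorted_perm guess (fun x => x) false)
  rw [hc, hg, split_code code guess, split_guess code guess hpre, inter_add_split,
    Multiset.card_add, Multiset.coe_card, Multiset.inter_comm]
  simp only [List.cons.injEq, and_true, true_and]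
  push_cast
  rw [pvU_length code guess]
  ring
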